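-- pv_equiv track=rewrite | github.com/Dagonite/countdown-tools | scripts/simulate_rounds.py | clumpiness_score
-- ===== SOURCE A (Python) =====
-- from typing import Iterable, List, Sequence, Tuple
--
-- NASTY_LETTERS = {"J", "K", "Q", "V", "W", "X", "Y", "Z"}
--
-- def clumpiness_score(deck: Sequence[str], duplicate_safe_gap: int, nasty_safe_gap: int) -> int:
--     """Score how tightly duplicates and nasty letters are bunched together in
--     the supplied deck."""
--
--     penalty: int = 0
--     last_seen: dict[str, int] = {}
--     last_nasty: int | None = None
--
--     for idx, letter in enumerate(deck):
--         if letter in last_seen: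
--             gap = idx - last_seen[letter]
--             if gap < duplicate_safe_gap:
--                 penalty += duplicate_safe_gap - gap
--         last_seen[letter] = idx
--
--         if letter in NASTY_LETTERS:
--             if last_nasty is not None:
--                 gap = idx - last_nasty
--                 if gap < nasty_safe_gap:
--                     penalty += 2 * (nasty_safe_gap - gap)
--             last_nasty = idx
--
--     return penalty
-- ===== SOURCE B (Python) =====
-- NASTY_LETTERS = {"J", "K", "Q", "V", "W", "X", "Y", "Z"}
--
-- def clumpiness_score(deck, duplicate_safe_gap, nasty_safe_gap):
--     # Index-then-group: collect each letter's occurrence indices and the nasty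
--     # indices in one pass, then score consecutive pairs group by group.
--     positions = {}
--     nasty_positions = []
--     for idx, letter in enumerate(deck):
--         positions.setdefault(letter, []).append(idx)
--         if letter in NASTY_LETTERS:
--             nasty_positions.append(idx)
--     penalty = 0
--     for idxs in positions.values():
--         for prev, cur in zip(idxs, idxs[1:]):
--             gap = cur - prev
--             if gap < duplicate_safe_gap:
--                 penalty += duplicate_safe_gap - gap
--     for prev, cur in zip(nasty_positions, nasty_positions[1:]):
--         gap = cur - prev
--         if gap < nasty_safe_gap:
--             penalty += 2 * (nasty_safe_gap - gap)
--     return penalty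
-- ===== Notes on version B (the rewrite author's own statement) =====
-- stated objective: alternative
-- what changed: Replaces the single running-state scan (last-seen dict + last-nasty register updated per step) with an index-then-group traversal: one pass builds each letter's occurrence-index list and the nasty-index list, then penalties are summed over consecutive pairs within each group.
import Mathlib
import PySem

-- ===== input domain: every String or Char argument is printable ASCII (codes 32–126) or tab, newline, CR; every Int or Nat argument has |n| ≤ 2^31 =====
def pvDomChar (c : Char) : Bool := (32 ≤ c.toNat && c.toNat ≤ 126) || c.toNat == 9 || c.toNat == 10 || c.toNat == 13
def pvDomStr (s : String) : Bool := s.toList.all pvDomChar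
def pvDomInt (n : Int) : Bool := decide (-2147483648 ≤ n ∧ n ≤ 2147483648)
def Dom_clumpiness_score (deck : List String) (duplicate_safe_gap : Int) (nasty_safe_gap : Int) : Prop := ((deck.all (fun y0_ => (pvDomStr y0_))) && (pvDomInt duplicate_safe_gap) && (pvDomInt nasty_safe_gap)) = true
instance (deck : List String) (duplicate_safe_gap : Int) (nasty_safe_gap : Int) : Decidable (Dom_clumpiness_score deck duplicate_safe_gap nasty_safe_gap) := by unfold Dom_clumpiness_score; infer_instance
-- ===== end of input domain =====

-- B replaces A's running-state scan with an index-then-group traversal (same cost): alternative decomposition.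


-- NASTY_LETTERS (module-level set constant, shared by both ports)
def pvNastyLetters : PySem.Set String := PySem.Set.ofList ["J", "K", "Q", "V", "W", "X", "Y", "Z"]

-- ===== PORT A =====
def clumpiness_score (deck : List String) (duplicate_safe_gap : Int) (nasty_safe_gap : Int) : Int :=
  ((PySem.List.enumerate deck).foldl
    (fun (st : Int × PySem.Dict String Int × Option Int) p =>
      let pen := st.1
      let last_seen := st.2.1
      let last_nasty := st.2.2
      -- if letter in last_seen: gap = idx - last_seen[letter]; if gap < duplicate_safe_gap: penalty += ...
      let pen := match last_seen.get? p.2 with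
        | some prev =>
            let gap := p.1 - prev
            if gap < duplicate_safe_gap then pen + (duplicate_safe_gap - gap) else pen
        | none => pen
      let last_seen := last_seen.insert p.2 p.1
      -- if letter in NASTY_LETTERS: ...
      if PySem.Set.contains pvNastyLetters p.2 then
        let pen := match last_nasty with
          | some prev =>
              let gap := p.1 - prev
              if gap < nasty_safe_gap then pen + 2 * (nasty_safe_gap - gap) else pen
          | none => pen
        (pen, last_seen, some p.1)
      else
        (pen, last_seen, last_nasty))
    (0, PySem.Dict.empty, none)).1

-- ===== PORT B =====
-- inner 'for prev, cur in zip(idxs, idxs[1:])' loop of Source B, with the penalty of one gap passed in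
def pvPairSum (f : Int → Int) : List Int → Int
  | a :: b :: t => f (b - a) + pvPairSum f (b :: t)
  | _ => 0

def clumpiness_score_alt (deck : List String) (duplicate_safe_gap : Int) (nasty_safe_gap : Int) : Int :=
  -- first pass: positions.setdefault(letter, []).append(idx); nasty_positions.append(idx)
  let positions := (PySem.List.enumerate deck).foldl
    (fun (d : PySem.Dict String (List Int)) p => d.modify p.2 [] (· ++ [p.1])) PySem.Dict.empty
  let nasty_positions := (PySem.List.enumerate deck).foldl
    (fun (acc : List Int) p => if PySem.Set.contains pvNastyLetters p.2 then acc ++ [p.1] else acc) []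
  -- second phase: consecutive pairs within each group
  let pen := positions.values.foldl
    (fun s idxs => s + pvPairSum (fun g => if g < duplicate_safe_gap then duplicate_safe_gap - g else 0) idxs) 0
  pen + pvPairSum (fun g => if g < nasty_safe_gap then 2 * (nasty_safe_gap - g) else 0) nasty_positions

-- ===== PRECONDITION & SPEC =====
def Spec_clumpiness_score (deck : List String) (duplicate_safe_gap : Int) (nasty_safe_gap : Int) (out : Int) : Prop := out = clumpiness_score_alt deck duplicate_safe_gap nasty_safe_gap
instance (deck : List String) (duplicate_safe_gap : Int) (nasty_safe_gap : Int) (out : Int) : Decidable (Spec_clumpiness_score deck duplicate_safe_gap nasty_safe_gap out) := by unfold Spec_clumpiness_score; infer_instance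

-- ===== CLAIM (what is proved, stated in full; the proofs are below) =====
def Claim_equal_clumpiness_score : Prop := ∀ (deck : List String) (duplicate_safe_gap : Int) (nasty_safe_gap : Int), Dom_clumpiness_score deck duplicate_safe_gap nasty_safe_gap → Spec_clumpiness_score deck duplicate_safe_gap nasty_safe_gap (clumpiness_score deck duplicate_safe_gap nasty_safe_gap)

-- ===== LEMMAS AND PROOFS =====

-- occurrence indices of letter c in the enumerated list l
def pvOcc (l : List (Int × String)) (c : String) : List Int :=
  (l.filter (fun p => p.2 == c)).map (·.1)

-- nasty indices of l
def pvNas (l : List (Int × String)) : List Int :=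
  (l.filter (fun p => PySem.Set.contains pvNastyLetters p.2)).map (·.1)

-- common characterisation both ports are reduced to
def pvSum (D N : Int) (l : List (Int × String)) : Int :=
  ((PySem.Set.ofList (l.map (·.2))).map
      (fun c => pvPairSum (fun g => if g < D then D - g else 0) (pvOcc l c))).sum
  + pvPairSum (fun g => if g < N then 2 * (N - g) else 0) (pvNas l)

theorem pvOcc_append_singleton (l : List (Int × String)) (p : Int × String) (c : String) :
    pvOcc (l ++ [p]) c = pvOcc l c ++ if p.2 == c then [p.1] else [] := by
  simp only [pvOcc, List.filter_append, List.map_append]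
  by_cases h : p.2 == c <;> simp [h]

theorem pvNas_append_singleton (l : List (Int × String)) (p : Int × String) :
    pvNas (l ++ [p]) = pvNas l ++ if PySem.Set.contains pvNastyLetters p.2 then [p.1] else [] := by
  simp only [pvNas, List.filter_append, List.map_append]
  by_cases h : p.2 ∈ pvNastyLetters <;>
    simp [PySem.Set.contains, h]

theorem pvPairSum_append_singleton (f : Int → Int) (xs : List Int) (n : Int) :
    pvPairSum f (xs ++ [n]) = pvPairSum f xs + ((xs.getLast?).map (fun a => f (n - a))).getD 0 := by
  induction xs with
  | nil => simp [pvPairSum]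
  | cons a tl ih =>
      cases tl with
      | nil => simp [pvPairSum]
      | cons b t =>
          show f (b - a) + pvPairSum f ((b :: t) ++ [n]) = _
          rw [ih, List.getLast?_cons_cons]
          show _ = f (b - a) + pvPairSum f (b :: t) + _
          ring

theorem pvOcc_empty_iff (l : List (Int × String)) (c : String) :
    pvOcc l c = [] ↔ c ∉ l.map (·.2) := by
  simp only [pvOcc, List.map_eq_nil_iff, List.filter_eq_nil_iff, List.mem_map]
  constructor
  · rintro h ⟨p, hp, rfl⟩
    exact absurd (by simp) (h p hp)
  · intro h p hp hc
    exact h ⟨p, hp, by simpa using hc⟩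

-- sum over a nodup key list when the summand changes at exactly one member
theorem pvSum_congr_except {g g' : String → Int} {ks : List String} {x : String}
    (hnd : ks.Nodup) (hx : x ∈ ks) (h : ∀ c ∈ ks, c ≠ x → g' c = g c) :
    (ks.map g').sum = (ks.map g).sum + (g' x - g x) := by
  induction ks with
  | nil => cases hx
  | cons a t ih =>
      rcases List.mem_cons.mp hx with rfl | hxt
      · have ht : ∀ c ∈ t, g' c = g c := fun c hc =>
          h c (List.mem_cons_of_mem _ hc) (fun hca => (List.nodup_cons.mp hnd).1 (hca ▸ hc))
        simp only [List.map_cons, List.sum_cons, List.map_congr_left ht]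
        ring
      · have ha : g' a = g a :=
          h a (List.mem_cons_self) (fun hax => (List.nodup_cons.mp hnd).1 (hax ▸ hxt))
        simp only [List.map_cons, List.sum_cons, ha,
          ih (List.nodup_cons.mp hnd).2 hxt (fun c hc => h c (List.mem_cons_of_mem _ hc))]
        ring

theorem pvSum_congr_all {g g' : String → Int} {ks : List String}
    (h : ∀ c ∈ ks, g' c = g c) : (ks.map g').sum = (ks.map g).sum := by
  rw [List.map_congr_left h]

-- Set.ofList distributes over a snoc
theorem pvOfList_snoc (ys : List String) (x : String) :
    PySem.Set.ofList (ys ++ [x]) = PySem.Set.add (PySem.Set.ofList ys) x := by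
  rw [PySem.Set.ofList_eq_foldl, PySem.Set.ofList_eq_foldl, List.foldl_append]
  rfl

theorem pvSum_append (D N : Int) (l : List (Int × String)) (p : Int × String) :
    pvSum D N (l ++ [p]) = pvSum D N l
      + ((pvOcc l p.2).getLast?.map (fun a => if p.1 - a < D then D - (p.1 - a) else 0)).getD 0
      + (if PySem.Set.contains pvNastyLetters p.2 then
           ((pvNas l).getLast?.map (fun a => if p.1 - a < N then 2 * (N - (p.1 - a)) else 0)).getD 0
         else 0) := by
  have hdup : ((PySem.Set.ofList ((l ++ [p]).map (·.2))).map
      (fun c => pvPairSum (fun g => if g < D then D - g else 0) (pvOcc (l ++ [p]) c))).sum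
      = ((PySem.Set.ofList (l.map (·.2))).map
      (fun c => pvPairSum (fun g => if g < D then D - g else 0) (pvOcc l c))).sum
      + ((pvOcc l p.2).getLast?.map (fun a => if p.1 - a < D then D - (p.1 - a) else 0)).getD 0 := by
    rw [List.map_append, List.map_singleton, pvOfList_snoc]
    by_cases hx : p.2 ∈ PySem.Set.ofList (l.map (·.2))
    · have hadd : PySem.Set.add (PySem.Set.ofList (l.map (·.2))) p.2
          = PySem.Set.ofList (l.map (·.2)) := by
        simp [PySem.Set.add, PySem.Set.contains, hx]
      rw [hadd]
      rw [pvSum_congr_except (g := fun c => pvPairSum (fun g => if g < D then D - g else 0) (pvOcc l c))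
        (PySem.Set.nodup_ofList _) hx ?_]
      · rw [pvOcc_append_singleton]
        simp only [beq_self_eq_true, if_true]
        rw [pvPairSum_append_singleton]
        ring
      · intro c _ hc
        rw [pvOcc_append_singleton]
        have : (p.2 == c) = false := by simp [Ne.symm hc]
        simp [this]
    · have hadd : PySem.Set.add (PySem.Set.ofList (l.map (·.2))) p.2
          = PySem.Set.ofList (l.map (·.2)) ++ [p.2] := by
        simp [PySem.Set.add, PySem.Set.contains, hx]
      have hocc : pvOcc l p.2 = [] :=
        (pvOcc_empty_iff l p.2).mpr (by simpa [PySem.Set.mem_ofList] using hx)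
      rw [hadd, List.map_append, List.sum_append, List.map_singleton, List.sum_singleton]
      rw [pvSum_congr_all (g := fun c => pvPairSum (fun g => if g < D then D - g else 0) (pvOcc l c)) ?_]
      · rw [pvOcc_append_singleton]
        simp only [beq_self_eq_true, if_true, hocc]
        simp [pvPairSum]
      · intro c hcmem
        have hc : c ≠ p.2 := by
          intro h; subst h
          exact hx hcmem
        rw [pvOcc_append_singleton]
        have : (p.2 == c) = false := by simp [Ne.symm hc]
        simp [this]
  have hnas : pvPairSum (fun g => if g < N then 2 * (N - g) else 0) (pvNas (l ++ [p]))
      = pvPairSum (fun g => if g < N then 2 * (N - g) else 0) (pvNas l)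
      + (if PySem.Set.contains pvNastyLetters p.2 then
           ((pvNas l).getLast?.map (fun a => if p.1 - a < N then 2 * (N - (p.1 - a)) else 0)).getD 0
         else 0) := by
    rw [pvNas_append_singleton]
    by_cases h : PySem.Set.contains pvNastyLetters p.2
    · rw [if_pos h, if_pos h, pvPairSum_append_singleton]
    · rw [if_neg h, if_neg h]
      simp
  simp only [pvSum, hdup, hnas]
  ring

-- A's loop body, one step of the scan
def pvStep (D N : Int) (st : Int × PySem.Dict String Int × Option Int) (p : Int × String) :
    Int × PySem.Dict String Int × Option Int :=
  let pen := st.1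
  let last_seen := st.2.1
  let last_nasty := st.2.2
  let pen := match last_seen.get? p.2 with
    | some prev =>
        let gap := p.1 - prev
        if gap < D then pen + (D - gap) else pen
    | none => pen
  let last_seen := last_seen.insert p.2 p.1
  if PySem.Set.contains pvNastyLetters p.2 then
    let pen := match last_nasty with
      | some prev =>
          let gap := p.1 - prev
          if gap < N then pen + 2 * (N - gap) else pen
      | none => pen
    (pen, last_seen, some p.1)
  else
    (pen, last_seen, last_nasty)

-- the invariant of A's scan: the full state after any enumerated prefix l
theorem pvScanTriple (D N : Int) (l : List (Int × String)) :
    (l.foldl (pvStep D N) (0, PySem.Dict.empty, none)).1 = pvSum D N l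
    ∧ (∀ c, (l.foldl (pvStep D N) (0, PySem.Dict.empty, none)).2.1.get? c = (pvOcc l c).getLast?)
    ∧ (l.foldl (pvStep D N) (0, PySem.Dict.empty, none)).2.2 = (pvNas l).getLast? := by
  induction l using List.reverseRecOn with
  | nil =>
      refine ⟨?_, fun c => ?_, ?_⟩ <;>
        simp [pvSum, pvOcc, pvNas, PySem.Dict.get?_empty, pvPairSum]
  | append_singleton l p ih =>
      obtain ⟨h1, h2, h3⟩ := ih
      rw [List.foldl_append, List.foldl_cons, List.foldl_nil]
      refine ⟨?_, fun c => ?_, ?_⟩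
      · -- penalty component
        rw [pvSum_append]
        simp only [pvStep, h2 p.2, h3, h1]
        by_cases hn : p.2 ∈ pvNastyLetters <;>
          rcases hocc : (pvOcc l p.2).getLast? with _ | a <;>
          rcases hnl : (pvNas l).getLast? with _ | b <;>
          simp [PySem.Set.contains, hn] <;> split_ifs <;> simp_all
      · -- last_seen component
        have hins : (((l.foldl (pvStep D N) (0, PySem.Dict.empty, none)).2.1.insert p.2 p.1).get? c)
            = (pvOcc (l ++ [p]) c).getLast? := by
          rw [PySem.Dict.get?_insert, pvOcc_append_singleton]
          by_cases hc : c = p.2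
          · subst hc
            simp
          · have : (p.2 == c) = false := by simp [Ne.symm hc]
            simp [hc, this, h2 c]
        simp only [pvStep]
        by_cases hn : p.2 ∈ pvNastyLetters <;> simp [PySem.Set.contains, hn, hins]
      · -- last_nasty component
        simp only [pvStep, pvNas_append_singleton]
        by_cases hn : p.2 ∈ pvNastyLetters <;>
          simp [PySem.Set.contains, hn, h3]

theorem pvScanInv (D N : Int) (l : List (Int × String)) :
    (l.foldl (pvStep D N) (0, PySem.Dict.empty, none)).1 = pvSum D N l :=
  (pvScanTriple D N l).1

-- the running getD of B's first-pass grouping fold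
theorem pvGetD_fold (l : List (Int × String)) (d : PySem.Dict String (List Int)) (c : String) :
    (l.foldl (fun d p => d.modify p.2 [] (· ++ [p.1])) d).getD c [] = d.getD c [] ++ pvOcc l c := by
  induction l generalizing d with
  | nil => simp [pvOcc]
  | cons p t ih =>
      rw [List.foldl_cons, ih, PySem.Dict.getD_modify]
      by_cases hc : c = p.2
      · subst hc
        simp [pvOcc]
      · have : (p.2 == c) = false := by simp [Ne.symm hc]
        simp [pvOcc, hc, this]

theorem pvAltChar (deck : List String) (D N : Int) :
    clumpiness_score_alt deck D N = pvSum D N (PySem.List.enumerate deck) := by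
  simp only [clumpiness_score_alt]
  have hnd : ((PySem.List.enumerate deck).foldl
      (fun (d : PySem.Dict String (List Int)) p => d.modify p.2 [] (· ++ [p.1]))
      PySem.Dict.empty).keys.Nodup := by
    exact PySem.Dict.nodup_keys_foldl_modify_key _ _ _ _ _ (by simp [PySem.Dict.keys_empty])
  have hkeys : ((PySem.List.enumerate deck).foldl
      (fun (d : PySem.Dict String (List Int)) p => d.modify p.2 [] (· ++ [p.1]))
      PySem.Dict.empty).keys = PySem.Set.ofList ((PySem.List.enumerate deck).map (·.2)) := by
    rw [PySem.Dict.keys_foldl_modify_key]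
    simp [PySem.Dict.keys_empty, PySem.Set.update_nil_left]
  rw [PySem.Dict.values_eq_map_keys _ hnd []]
  rw [PySem.List.foldl_add, PySem.List.foldl_append_if]
  simp only [List.map_map, hkeys, zero_add, List.nil_append]
  congr 1
  refine congrArg List.sum (List.map_congr_left (fun c _ => ?_))
  simp only [Function.comp_apply, pvGetD_fold, PySem.Dict.getD_empty, List.nil_append]

-- ===== VERDICT (by name: the statement is the Claim_ definition above) =====
theorem clumpiness_score_spec : Claim_equal_clumpiness_score := by
  intro deck D N _
  show clumpiness_score deck D N = clumpiness_score_alt deck D N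
  rw [pvAltChar, ← pvScanInv D N (PySem.List.enumerate deck)]
  rfl
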